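-- pv_equiv track=rewrite | github.com/of3jlmssoo/interactive-coding-challenges-mychallenges | bit_manipulation/get_next/test_get_next_largest.py | change_num
-- ===== SOURCE A (Python) =====
-- def change_num(candidates: list, num:int) -> int:
--     result = ''
--     num_bin_splitted_01 = bin(num)[2:].split(candidates[0]) # remove first two charcter '0b' and split by '01' or '10' (cadidate[0])
--     num_bin_splitted_01_len = len(num_bin_splitted_01)
--     for i in range(num_bin_splitted_01_len-1): # -1 : as for the last element in num_bin_splitted_01
--                                                # it will be added to result without any append_char in return statement
--         append_char = candidates[(num_bin_splitted_01_len-2)==i]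
--                                                # -2 : the last candidates[0] will be replace with candidates[1]
--         result = result + num_bin_splitted_01[i] + append_char
--     return int(result + num_bin_splitted_01[num_bin_splitted_01_len-1],base=2)
-- ===== SOURCE B (Python) =====
-- def change_num(candidates: list, num: int) -> int:
--     # Locate the last non-overlapping occurrence of candidates[0] in bin(num)[2:]
--     # and splice candidates[1] in its place (no split/rejoin loop).
--     s = bin(num)[2:]
--     sep = candidates[0]
--     last = -1
--     start = 0
--     while True:
--         j = s.find(sep, start)
--         if j < 0:
--             break
--         last = j
--         start = j + len(sep)
--     if last < 0:
--         return int(s, 2)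
--     return int(s[:last] + candidates[1] + s[last + len(sep):], 2)
-- ===== Notes on version B (the rewrite author's own statement) =====
-- stated objective: alternative
-- what changed: B replaces A's split-into-all-parts-and-rejoin loop by a single left-to-right scan with str.find that records the last non-overlapping occurrence of candidates[0] and splices candidates[1] in at that position.
-- outside the precondition, e.g. on change_num(['b', ''], -5): A returns 5, B returns 5; on change_num(['10', '1_0'], 2): A returns 2, B returns 2
import Mathlib
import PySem

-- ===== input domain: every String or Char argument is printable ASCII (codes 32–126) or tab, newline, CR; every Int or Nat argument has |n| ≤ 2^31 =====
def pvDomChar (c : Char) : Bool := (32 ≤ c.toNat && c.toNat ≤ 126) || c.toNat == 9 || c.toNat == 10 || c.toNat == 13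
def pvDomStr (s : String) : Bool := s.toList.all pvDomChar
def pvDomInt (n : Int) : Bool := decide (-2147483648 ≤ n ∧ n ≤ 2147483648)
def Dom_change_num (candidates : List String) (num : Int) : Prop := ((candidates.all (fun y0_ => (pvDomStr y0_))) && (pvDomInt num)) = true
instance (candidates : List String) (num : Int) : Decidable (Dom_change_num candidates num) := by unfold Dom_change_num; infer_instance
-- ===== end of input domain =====

-- B replaces A's split-into-parts-and-rejoin loop by a single scan for the last
-- non-overlapping occurrence of candidates[0] plus one splice (objective: alternative).

-- ===== PORT A =====
-- literal port: split bin(num)[2:] by candidates[0], rejoin with candidates[0]/candidates[1] in an index loop.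
def change_num (candidates : List String) (num : Int) : Int :=
  match PySem.List.pyGet? candidates 0 with
  | none => 0  -- Python: IndexError (excluded by Pre_)
  | some c0 =>
    let s : List Char := PySem.Chars.slice (PySem.Int.pyBin num).toList (some 2) none
    match PySem.Chars.split? s c0.toList with
    | none => 0  -- Python: ValueError on sep = '' (excluded by Pre_)
    | some parts =>
      let n : Int := (parts.length : Int)
      let result : List Char :=
        (PySem.List.pyRange 0 (n - 1) 1).foldl (fun r i =>
          r ++ PySem.List.pyGetD parts i []
            ++ (PySem.List.pyGetD candidates (if (n - 2) == i then 1 else 0) "").toList) []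
      (PySem.Int.ofCharsBase? (result ++ PySem.List.pyGetD parts (n - 1) []) 2).getD 0
        -- int(·, 2); ValueError (none) excluded by Pre_

-- ===== PORT B =====
-- B-side helper: Source B's while-loop; the fuel only makes it total (with sep ≠ [] it never runs out).
def lastOccAux (s sep : List Char) (start : Nat) (last : Int) (fuel : Nat) : Int :=
  match fuel with
  | 0 => last
  | fuel + 1 =>
    let j := PySem.Chars.findFrom s sep (start : Int) none
    if j < 0 then last else lastOccAux s sep (j.toNat + sep.length) j fuel

def change_num_alt (candidates : List String) (num : Int) : Int :=
  let s : List Char := PySem.Chars.slice (PySem.Int.pyBin num).toList (some 2) none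
  let sep : List Char := (PySem.List.pyGetD candidates 0 "").toList
  let last : Int := lastOccAux s sep 0 (-1) (s.length + 1)
  if last < 0 then (PySem.Int.ofCharsBase? s 2).getD 0
  else
    (PySem.Int.ofCharsBase?
      (PySem.Chars.slice s none (some last)
        ++ (PySem.List.pyGetD candidates 1 "").toList
        ++ PySem.Chars.slice s (some (last + (sep.length : Int))) none) 2).getD 0

-- ===== PRECONDITION & SPEC =====
-- Pre_ excludes negative num and a non-0/1 candidates[1] when candidates[0] occurs (there A almost always
-- raises ValueError in int(·,2), though it can accidentally return when the spliced string still parses as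
-- binary — see cites); and the inputs where A raises: candidates = [] (IndexError), candidates[0] = ''
-- (ValueError in split), candidates[0] occurring with candidates[1] missing (IndexError) or the spliced
-- string empty (ValueError).
def Pre_change_num (candidates : List String) (num : Int) : Prop :=
  0 ≤ num ∧ candidates ≠ [] ∧ (candidates.headD "").toList ≠ [] ∧
  (PySem.Chars.isIn (candidates.headD "").toList ((PySem.Int.pyBin num).toList.drop 2) = true →
    2 ≤ candidates.length ∧
    ((candidates.getD 1 "").toList.all (fun c => c == '0' || c == '1')) = true ∧
    ¬((PySem.Int.pyBin num).toList.drop 2 = (candidates.headD "").toList ∧ candidates.getD 1 "" = ""))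
instance (candidates : List String) (num : Int) : Decidable (Pre_change_num candidates num) := by
  unfold Pre_change_num; infer_instance

def pvWitness_change_num : List String × Int := (["10", "1"], 5)

def Spec_change_num (candidates : List String) (num : Int) (out : Int) : Prop := out = change_num_alt candidates num
instance (candidates : List String) (num : Int) (out : Int) : Decidable (Spec_change_num candidates num out) := by
  unfold Spec_change_num; infer_instance

-- ===== CLAIM (what is proved, stated in full; the proofs are below) =====
def Claim_equal_change_num : Prop := ∀ (candidates : List String) (num : Int), Dom_change_num candidates num → Pre_change_num candidates num → Spec_change_num candidates num (change_num candidates num)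

-- ===== LEMMAS AND PROOFS =====

-- proof-side model of Python's left-to-right non-overlapping split
def icat (sep : List Char) : List (List Char) → List Char
  | [] => []
  | [x] => x
  | x :: y :: xs => x ++ sep ++ icat sep (y :: xs)

def sp (sep l : List Char) : List (List Char) :=
  if h : sep ≠ [] ∧ sep.isPrefixOf l then
    [] :: sp sep (l.drop sep.length)
  else
    match l with
    | [] => [[]]
    | c :: rest =>
      match sp sep rest with
      | [] => [[c]]  -- unreachable: sp never returns []
      | x :: xs => (c :: x) :: xs
termination_by l.length
decreasing_by
  · have hpl : sep <+: l := List.isPrefixOf_iff_prefix.mp h.2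
    have h1 : 0 < sep.length := List.length_pos_iff.mpr h.1
    have h2 : sep.length ≤ l.length := hpl.length_le
    simp [List.length_drop]; omega
  · simp

theorem sp_ne_nil (sep l : List Char) : sp sep l ≠ [] := by
  fun_induction sp sep l with
  | case1 l h ih => simp
  | case2 h => simp
  | case3 c rest h heq ih => simp
  | case4 c rest h x xs heq ih => simp

theorem icat_sp (sep l : List Char) (hsep : sep ≠ []) : icat sep (sp sep l) = l := by
  fun_induction sp sep l with
  | case1 l h ih =>
    obtain ⟨x, xs, hx⟩ : ∃ x xs, sp sep (l.drop sep.length) = x :: xs := by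
      rcases hq : sp sep (l.drop sep.length) with _ | ⟨x, xs⟩
      · exact absurd hq (sp_ne_nil sep _)
      · exact ⟨x, xs, rfl⟩
    rw [hx] at ih ⊢
    have hpre : sep <+: l := List.isPrefixOf_iff_prefix.mp h.2
    have hl : l = sep ++ l.drop sep.length := by
      obtain ⟨t, ht⟩ := hpre
      subst ht; simp
    calc icat sep ([] :: x :: xs) = sep ++ icat sep (x :: xs) := by simp [icat]
    _ = sep ++ l.drop sep.length := by rw [ih]
    _ = l := hl.symm
  | case2 h => simp [icat]
  | case3 c rest h heq ih => exact absurd heq (sp_ne_nil sep rest)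
  | case4 c rest h x xs heq ih =>
    rw [heq] at ih
    cases xs with
    | nil => simp [icat] at ih ⊢; exact ih
    | cons y ys =>
      simp only [icat] at ih ⊢
      simp [← ih]

-- first-occurrence characterisation of Chars.find
theorem find_eq_of (l sep : List Char) (j : Nat) (hj : sep <+: l.drop j)
    (hmin : ∀ i < j, ¬ sep <+: l.drop i) : PySem.Chars.find l sep = (j : Int) := by
  have hinf : sep <:+: l := (PySem.Chars.exists_prefix_drop_iff_isIn sep l).mp ⟨j, hj⟩
    |> (PySem.Chars.isIn_iff_infix sep l).mp
  have hnn : 0 ≤ PySem.Chars.find l sep := (PySem.Chars.find_nonneg_iff l sep).mpr hinf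
  obtain ⟨hf1, hf2⟩ := PySem.Chars.find_spec hnn
  rcases Nat.lt_trichotomy (PySem.Chars.find l sep).toNat j with h | h | h
  · exact absurd hf1 (hmin _ h)
  · omega
  · exact absurd hj (hf2 j h)

-- the split structure of l: either one part (no occurrence) or head part + first occurrence + tail parts
theorem sp_cases (sep l : List Char) (hsep : sep ≠ []) :
    (sp sep l = [l] ∧ PySem.Chars.find l sep = -1) ∨
    (∃ p ps, sp sep l = p :: ps ∧ ps ≠ [] ∧ PySem.Chars.find l sep = (p.length : Int) ∧
      l = p ++ sep ++ l.drop (p.length + sep.length) ∧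
      sp sep (l.drop (p.length + sep.length)) = ps) := by
  fun_induction sp sep l with
  | case1 l h ih =>
    right
    refine ⟨[], sp sep (l.drop sep.length), rfl, sp_ne_nil sep _, ?_, ?_, by simp⟩
    · have h0 : sep <+: l.drop 0 := by simpa using List.isPrefixOf_iff_prefix.mp h.2
      simpa using find_eq_of l sep 0 h0 (by omega)
    · obtain ⟨t, ht⟩ := List.isPrefixOf_iff_prefix.mp h.2
      subst ht; simp
  | case2 h =>
    left
    refine ⟨rfl, (PySem.Chars.find_eq_neg_one_iff [] sep).mpr ?_⟩
    simp [List.infix_nil]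
    intro hs
    exact hsep hs
  | case3 c rest h heq ih => exact absurd heq (sp_ne_nil sep rest)
  | case4 c rest h x xs heq ih =>
    have hnp : ¬ sep <+: (c :: rest) := by
      intro hp
      exact h ⟨hsep, List.isPrefixOf_iff_prefix.mpr hp⟩
    rcases ih with ⟨h1, h2⟩ | ⟨p, ps, hsp, hps, hfind, hdec, htail⟩
    · left
      rw [h1] at heq
      obtain ⟨e1, e2⟩ := List.cons_eq_cons.mp heq
      refine ⟨by rw [← e1, ← e2], (PySem.Chars.find_eq_neg_one_iff _ sep).mpr ?_⟩
      intro hinf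
      obtain ⟨j, hj⟩ := (PySem.Chars.exists_prefix_drop_iff_isIn sep (c :: rest)).mpr
        ((PySem.Chars.isIn_iff_infix sep (c :: rest)).mpr hinf)
      cases j with
      | zero => exact hnp (by simpa using hj)
      | succ j' =>
        have : sep <:+: rest :=
          (PySem.Chars.isIn_iff_infix sep rest).mp
            ((PySem.Chars.exists_prefix_drop_iff_isIn sep rest).mp ⟨j', by simpa using hj⟩)
        exact ((PySem.Chars.find_eq_neg_one_iff rest sep).mp h2) this
    · right
      rw [hsp] at heq
      obtain ⟨e1, e2⟩ := List.cons_eq_cons.mp heq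
      have hnn : (0:Int) ≤ (p.length : Int) := by positivity
      have hfr := PySem.Chars.find_spec (s := rest) (sub := sep) (by rw [hfind]; exact hnn)
      rw [hfind] at hfr
      have hdropc : (c :: rest).drop ((c :: p).length + sep.length) = rest.drop (p.length + sep.length) := by
        simp only [List.length_cons]
        rw [show p.length + 1 + sep.length = (p.length + sep.length) + 1 from by omega]
        simp
      refine ⟨c :: p, ps, by rw [← e1, ← e2], hps, ?_, ?_, ?_⟩
      · have hj : sep <+: (c :: rest).drop (p.length + 1) := by
          have hd : (c :: rest).drop (p.length + 1) = rest.drop p.length := by simp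
          rw [hd]
          have h1 := hfr.1
          simpa using h1
        have hmin : ∀ i < p.length + 1, ¬ sep <+: (c :: rest).drop i := by
          intro i hi
          cases i with
          | zero => simpa using hnp
          | succ i' =>
            have h2 := hfr.2 i' (by omega)
            simpa using h2
        have hfe := find_eq_of (c :: rest) sep (p.length + 1) hj hmin
        rw [hfe]
        simp only [List.length_cons]
      · rw [hdropc]
        conv_lhs => rw [show c :: rest = c :: (p ++ sep ++ rest.drop (p.length + sep.length)) from by rw [← hdec]]
        simp
      · rw [hdropc, htail]

theorem go_eq_sp (sep : List Char) (hsep : sep ≠ []) :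
    ∀ (fuel : Nat) (l cur : List Char) (acc : List (List Char)), l.length < fuel →
      PySem.Chars.splitOn.go sep fuel l cur acc =
        acc.reverse ++ (match sp sep l with
          | [] => []
          | x :: xs => (cur.reverse ++ x) :: xs) := by
  intro fuel
  induction fuel with
  | zero => intro l cur acc h; omega
  | succ f ihf =>
    intro l cur acc hlen
    rw [PySem.Chars.splitOn.go.eq_def]
    cases l with
    | nil =>
      have hsp : sp sep [] = [[]] := by
        rw [sp]
        have hng : ¬ (sep ≠ [] ∧ sep.isPrefixOf ([] : List Char)) := by
          rintro ⟨h1, h2⟩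
          exact h1 (by simpa using List.isPrefixOf_iff_prefix.mp h2)
        rw [dif_neg hng]
      simp [hsp]
    | cons c rest =>
      by_cases hp : sep.isPrefixOf (c :: rest)
      · have hpre : sep <+: (c :: rest) := List.isPrefixOf_iff_prefix.mp hp
        have hlp : 0 < sep.length := List.length_pos_iff.mpr hsep
        have hdl : ((c :: rest).drop sep.length).length < f := by
          have := hpre.length_le
          simp only [List.length_drop]
          simp at hlen this ⊢
          omega
        simp only [hp, if_true]
        rw [ihf _ [] _ hdl]
        have hsp : sp sep (c :: rest) = [] :: sp sep ((c :: rest).drop sep.length) := by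
          rw [sp]
          rw [dif_pos ⟨hsep, hp⟩]
        rw [hsp]
        rcases hq : sp sep ((c :: rest).drop sep.length) with _ | ⟨x, xs⟩
        · exact absurd hq (sp_ne_nil sep _)
        · simp
      · simp only [hp, if_false]
        rw [ihf rest (c :: cur) acc (by simp at hlen ⊢; omega)]
        have hsp : sp sep (c :: rest) =
            match sp sep rest with
            | [] => [[c]]
            | x :: xs => (c :: x) :: xs := by
          rw [sp]
          have hng : ¬ (sep ≠ [] ∧ sep.isPrefixOf (c :: rest)) := by rintro ⟨_, h2⟩; exact hp h2
          rw [dif_neg hng]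
        rw [hsp]
        rcases hq : sp sep rest with _ | ⟨x, xs⟩
        · exact absurd hq (sp_ne_nil sep rest)
        · simp

theorem splitOn_eq_sp (s sep : List Char) (hsep : sep ≠ []) :
    PySem.Chars.splitOn s sep = sp sep s := by
  unfold PySem.Chars.splitOn
  rw [go_eq_sp sep hsep (s.length + 1) s [] [] (by omega)]
  rcases hq : sp sep s with _ | ⟨x, xs⟩
  · exact absurd hq (sp_ne_nil sep s)
  · simp

theorem icat_append_last (sep x : List Char) :
    ∀ qs : List (List Char), icat sep (qs ++ [x]) = (qs.map (· ++ sep)).flatten ++ x := by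
  intro qs
  induction qs with
  | nil => simp [icat]
  | cons q qs' ih =>
    cases qs' with
    | nil => simp [icat]
    | cons r rs => simp only [icat, List.cons_append, List.map_cons, List.flatten_cons] at ih ⊢; simp [ih]

theorem flatten_map_eq_icat (sep : List Char) :
    ∀ dl : List (List Char), dl ≠ [] → (dl.map (· ++ sep)).flatten = icat sep dl ++ sep := by
  intro dl
  induction dl with
  | nil => intro h; exact absurd rfl h
  | cons q qs ih =>
    intro _
    cases qs with
    | nil => simp [icat]
    | cons r rs =>
      have ih2 := ih (by simp)
      simp only [List.map_cons, List.flatten_cons] at ih2 ⊢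
      rw [show icat sep (q :: r :: rs) = q ++ sep ++ icat sep (r :: rs) from rfl]
      rw [List.append_assoc (q ++ sep) (icat sep (r :: rs)) sep, ← ih2]

-- the scan of Source B computes the position of the last non-overlapping occurrence
theorem scan_eq (s sep : List Char) (hsep : sep ≠ []) :
    ∀ (fuel k : Nat) (last : Int), k ≤ s.length → s.length - k < fuel →
      lastOccAux s sep k last fuel =
        if (sp sep (s.drop k)).length ≤ 1 then last
        else (k : Int) + ((s.drop k).length : Int) - (sep.length : Int)
          - (((sp sep (s.drop k)).getLastD []).length : Int) := by
  intro fuel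
  induction fuel with
  | zero => intro k last hk h; omega
  | succ f ihf =>
    intro k last hk hfuel
    rw [lastOccAux]
    rw [PySem.Chars.findFrom_natCast s sep k hk]
    rcases sp_cases sep (s.drop k) hsep with ⟨h1, h2⟩ | ⟨p, ps, hsp, hps, hfind, hdec, htail⟩
    · rw [h2]
      simp [h1]
    · rw [hfind]
      have hplne : ((p.length : Int)) ≠ -1 := by omega
      rw [if_neg hplne]
      have hjnn : ¬ ((k : Int) + (p.length : Int) < 0) := by omega
      rw [if_neg hjnn]
      have htn : ((k : Int) + (p.length : Int)).toNat = k + p.length := by omega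
      rw [htn]
      have hlen_dec : p.length + sep.length ≤ (s.drop k).length := by
        conv_rhs => rw [hdec]
        simp
      have hsl : (s.drop k).length = s.length - k := by simp
      have hk' : k + p.length + sep.length ≤ s.length := by omega
      have hslen : 0 < sep.length := List.length_pos_iff.mpr hsep
      have hfl : s.length - (k + p.length + sep.length) < f := by omega
      rw [ihf (k + p.length + sep.length) ((k : Int) + (p.length : Int)) hk' hfl]
      have hdd : s.drop (k + p.length + sep.length) = (s.drop k).drop (p.length + sep.length) := by
        rw [List.drop_drop]
        congr 1
        omega
      rw [hdd, htail]
      have hlast : (p :: ps).getLastD [] = ps.getLastD [] := by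
        cases ps with
        | nil => exact absurd rfl hps
        | cons a as => simp
      rw [hsp, hlast]
      have hlen2 : ¬ (p :: ps).length ≤ 1 := by
        cases ps with
        | nil => exact absurd rfl hps
        | cons a as => simp
      simp only [hlen2, if_false]
      have htl : ((s.drop k).drop (p.length + sep.length)).length =
          (s.drop k).length - (p.length + sep.length) := by
        simp [Nat.sub_sub]
      cases ps with
      | nil => exact absurd rfl hps
      | cons q qs =>
        cases qs with
        | nil =>
          -- exactly two parts: the recursive call returns its `last`, i.e. k + |p|
          rw [if_pos (by simp : ([q] : List (List Char)).length ≤ 1)]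
          -- tail text equals the single tail part q
          have hq : (s.drop k).drop (p.length + sep.length) = q := by
            have := icat_sp sep ((s.drop k).drop (p.length + sep.length)) hsep
            rw [htail] at this
            simpa [icat] using this.symm
          have : (s.drop k).length = p.length + sep.length + q.length := by
            conv_lhs => rw [hdec]
            simp [hq]
            omega
          simp only [List.getLastD_cons, List.getLastD_nil]
          push_cast
          omega
        | cons r rs =>
          rw [if_neg (by simp : ¬ ((q :: r :: rs) : List (List Char)).length ≤ 1)]
          have : (s.drop k).length = p.length + sep.length + ((s.drop k).drop (p.length + sep.length)).length := by
            conv_lhs => rw [hdec]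
            simp
            omega
          simp only [List.getLastD_cons]
          push_cast
          omega

-- A's rejoin loop and the last-part lookup, evaluated
theorem getD_last (parts : List (List Char)) (h : parts ≠ []) :
    parts.getD (parts.length - 1) [] = parts.getLastD [] := by
  induction parts with
  | nil => exact absurd rfl h
  | cons a as ih =>
    cases as with
    | nil => simp
    | cons b bs =>
      have h2 := ih (by simp)
      simpa using h2

theorem foldA (parts : List (List Char)) (sep c1 : List Char) (m : Nat)
    (hlen : parts.length = m + 2) :
    (PySem.List.pyRange 0 ((parts.length : Int) - 1) 1).foldl
      (fun r i => r ++ PySem.List.pyGetD parts i []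
        ++ (if ((parts.length : Int) - 2) == i then c1 else sep)) []
    = ((parts.take m).map (· ++ sep)).flatten ++ parts.getD m [] ++ c1 := by
  rw [hlen]
  have h1 : ((m + 2 : Nat) : Int) - 1 = ((m + 1 : Nat) : Int) := by push_cast; ring
  have h2 : ((m + 2 : Nat) : Int) - 2 = ((m : Nat) : Int) := by push_cast; ring
  rw [h1, h2, PySem.List.pyRange_zero_natCast, List.foldl_map]
  have key : ∀ t, t ≤ m →
      (List.range t).foldl
        (fun r (i : Nat) => r ++ PySem.List.pyGetD parts (i : Int) []
          ++ (if ((m : Nat) : Int) == (i : Int) then c1 else sep)) []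
      = ((parts.take t).map (· ++ sep)).flatten := by
    intro t
    induction t with
    | zero => intro _; simp
    | succ t iht =>
      intro ht
      rw [List.range_succ, List.foldl_append, iht (by omega)]
      have hne : (((m : Nat) : Int) == ((t : Nat) : Int)) = false := by
        simp [beq_iff_eq]
        omega
      simp only [List.foldl_cons, List.foldl_nil, hne, if_false, Bool.false_eq_true]
      rw [PySem.List.pyGetD_natCast]
      have htake : parts.take (t + 1) = parts.take t ++ [parts.getD t []] := by
        rw [List.take_succ]
        congr 1
        have : t < parts.length := by omega
        simp [List.getElem?_eq_getElem this, List.getD_eq_getElem?_getD, Option.getD]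
      rw [htake]
      simp
  rw [List.range_succ, List.foldl_append, key m (by omega)]
  have heq : (((m : Nat) : Int) == ((m : Nat) : Int)) = true := by simp
  simp only [List.foldl_cons, List.foldl_nil, heq, if_true]
  rw [PySem.List.pyGetD_natCast]

-- ===== VERDICT (by name: the statement is the Claim_ definition above) =====
theorem dropLast_concat_getLastD (l : List (List Char)) (d : List Char) (h : l ≠ []) :
    l.dropLast ++ [l.getLastD d] = l := by
  induction l with
  | nil => exact absurd rfl h
  | cons a as ih =>
    cases as with
    | nil => simp
    | cons b bs => simpa using ih (by simp)

set_option maxHeartbeats 2000000 in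
theorem change_num_spec : Claim_equal_change_num := by
  intro candidates num hdom hpre
  unfold Spec_change_num
  obtain ⟨hnum, hne, hsepne, hocc⟩ := hpre
  cases candidates with
  | nil => exact absurd rfl hne
  | cons c0 cs =>
  have hsep : c0.toList ≠ [] := by simpa using hsepne
  unfold change_num change_num_alt
  have hget0 : PySem.List.pyGet? (c0 :: cs) 0 = some c0 := by
    simp [PySem.List.pyGet?, PySem.List.pyIdx?]
  have hgetD0 : PySem.List.pyGetD (c0 :: cs) 0 "" = c0 := by
    simp [PySem.List.pyGetD, PySem.List.pyIdx?]
  have hsplit : PySem.Chars.split? (PySem.Chars.slice (PySem.Int.pyBin num).toList (some 2) none) c0.toList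
      = some (sp c0.toList (PySem.Chars.slice (PySem.Int.pyBin num).toList (some 2) none)) := by
    unfold PySem.Chars.split?
    rw [if_neg (by simpa using hsep)]
    rw [splitOn_eq_sp _ _ hsep]
  simp only [hget0, hsplit, hgetD0]
  set S : List Char := PySem.Chars.slice (PySem.Int.pyBin num).toList (some 2) none with hSdef
  set c1L : List Char := (PySem.List.pyGetD (c0 :: cs) 1 "").toList with hc1def
  have hpush : ∀ (i : Int),
      (PySem.List.pyGetD (c0 :: cs)
        (if ((((sp c0.toList S).length : Int) - 2 == i) = true) then 1 else 0) "").toList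
      = if ((((sp c0.toList S).length : Int) - 2 == i) = true) then c1L else c0.toList := by
    intro i
    split
    · rfl
    · rw [hgetD0]
  simp only [hpush]
  rcases sp_cases c0.toList S hsep with ⟨hone, hfneg⟩ | ⟨p, ps, hsp, hps, hfind, hdec, htail⟩
  · -- no occurrence: both sides parse S unchanged
    have hscan := scan_eq S c0.toList hsep (S.length + 1) 0 (-1) (by omega) (by omega)
    simp only [List.drop_zero, hone] at hscan
    norm_num at hscan
    rw [hscan, if_pos (by norm_num : (-1 : Int) < 0)]
    simp only [hone]
    have h10 : ((([S] : List (List Char)).length : Int)) - 1 = ((0 : Nat) : Int) := by simp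
    rw [h10, PySem.List.pyRange_zero_natCast, PySem.List.pyGetD_natCast]
    simp
  · -- at least one occurrence
    cases ps with
    | nil => exact absurd rfl hps
    | cons q qs =>
    set m : Nat := qs.length with hmdef
    have hplen : (p :: q :: qs).length = m + 2 := by simp; omega
    -- A's loop via foldA
    rw [hsp, foldA (p :: q :: qs) c0.toList c1L m hplen]
    -- A's trailing element is the last part
    have hl1 : (((p :: q :: qs).length : Int)) - 1 = ((m + 1 : Nat) : Int) := by
      rw [hplen]; push_cast; ring
    rw [hl1, PySem.List.pyGetD_natCast]
    have hlastidx : m + 1 = (p :: q :: qs).length - 1 := by rw [hplen]; omega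
    rw [hlastidx, getD_last (p :: q :: qs) (by simp)]
    -- B's scan result
    have hscan := scan_eq S c0.toList hsep (S.length + 1) 0 (-1) (by omega) (by omega)
    simp only [List.drop_zero, hsp] at hscan
    rw [if_neg (by simp)] at hscan
    simp only [Nat.cast_zero, zero_add] at hscan
    rw [hscan]
    -- decomposition of S around the last separator
    set X : List Char := (p :: q :: qs).getLastD [] with hXdef
    set dl : List (List Char) := (p :: q :: qs).dropLast with hdldef
    have hdlne : dl ≠ [] := by rw [hdldef]; simp
    have hicat : icat c0.toList (p :: q :: qs) = S := by
      have h := icat_sp c0.toList S hsep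
      rw [hsp] at h
      exact h
    have hSdec : S = icat c0.toList dl ++ (c0.toList ++ X) := by
      calc S = icat c0.toList (dl ++ [X]) := by
              rw [dropLast_concat_getLastD (p :: q :: qs) [] (by simp), hicat]
      _ = (dl.map (· ++ c0.toList)).flatten ++ X := icat_append_last c0.toList X dl
      _ = (icat c0.toList dl ++ c0.toList) ++ X := by rw [flatten_map_eq_icat c0.toList dl hdlne]
      _ = icat c0.toList dl ++ (c0.toList ++ X) := by rw [List.append_assoc]
    have hSlen : S.length = (icat c0.toList dl).length + c0.toList.length + X.length := by
      rw [hSdec]; simp; omega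
    have hL : ((S.length : Int)) - (c0.toList.length : Int) - (X.length : Int)
        = (((icat c0.toList dl).length : Nat) : Int) := by
      rw [hSlen]; push_cast; ring
    rw [hL]
    rw [if_neg (by omega)]
    -- the two slices
    have htake : PySem.Chars.slice S none (some (((icat c0.toList dl).length : Nat) : Int))
        = icat c0.toList dl := by
      rw [PySem.Chars.slice_eq_listSlice, PySem.List.slice_to S (by omega)]
      rw [Int.toNat_natCast, hSdec, List.take_left]
    have hdrop : PySem.Chars.slice S (some ((((icat c0.toList dl).length : Nat) : Int) + ((c0.toList.length : Nat) : Int))) none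
        = X := by
      rw [PySem.Chars.slice_eq_listSlice, PySem.List.slice_from S (by omega)]
      have h1 : ((((icat c0.toList dl).length : Nat) : Int) + ((c0.toList.length : Nat) : Int)).toNat
          = (icat c0.toList dl ++ c0.toList).length := by
        simp
        omega
      rw [h1]
      have h2 : S = (icat c0.toList dl ++ c0.toList) ++ X := by
        rw [hSdec, List.append_assoc]
      rw [h2, List.drop_left]
    rw [htake, hdrop]
    -- identify A's join prefix with icat of the dropLast parts
    have hdl_take : dl = (p :: q :: qs).take (m + 1) := by
      rw [hdldef, List.dropLast_eq_take, hplen]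
      norm_num
    have htk : (p :: q :: qs).take (m + 1) = (p :: q :: qs).take m ++ [(p :: q :: qs).getD m []] := by
      rw [List.take_add_one]
      congr 1
      have hm : m < (p :: q :: qs).length := by rw [hplen]; omega
      simp [List.getElem?_eq_getElem hm, List.getD_eq_getElem?_getD, Option.getD]
    have hicatdl : icat c0.toList dl
        = (((p :: q :: qs).take m).map (· ++ c0.toList)).flatten ++ (p :: q :: qs).getD m [] := by
      rw [hdl_take, htk, icat_append_last]
    rw [hicatdl]
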